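-- pv_equiv track=rewrite | github.com/oigomezz/Retos | Hackerearth/Algorithms/String-Algorithm/String-Manipulation/Can-You-Count/solution.py | can_you_count
-- ===== SOURCE A (Python) =====
-- def can_you_count(s):
--     vowels = 'aeiou'
--     t = ''
--     total = 1
--     for c in s:
--         if c in vowels:
--             if c not in t:
--                 t += c
--         elif c == '_':
--             total *= len(t)
--     return total % 9223372036854775808
-- ===== SOURCE B (Python) =====
-- def can_you_count(s):
--     # factor at underscore position i = number of vowel first-occurrence
--     # indices strictly before i; no running seen-set is maintained
--     firsts = [s.index(v) for v in "aeiou" if v in s]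
--     total = 1
--     for i, c in enumerate(s):
--         if c == "_":
--             total *= sum(1 for f in firsts if f < i)
--     return total % 9223372036854775808
-- ===== Notes on version B (the rewrite author's own statement) =====
-- stated objective: alternative
-- what changed: B eliminates A's running seen-vowel accumulator: it precomputes the first-occurrence index of each vowel present in the string, and the factor applied at each underscore is the count of those first-occurrence indices lying strictly before that position.
import Mathlib
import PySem

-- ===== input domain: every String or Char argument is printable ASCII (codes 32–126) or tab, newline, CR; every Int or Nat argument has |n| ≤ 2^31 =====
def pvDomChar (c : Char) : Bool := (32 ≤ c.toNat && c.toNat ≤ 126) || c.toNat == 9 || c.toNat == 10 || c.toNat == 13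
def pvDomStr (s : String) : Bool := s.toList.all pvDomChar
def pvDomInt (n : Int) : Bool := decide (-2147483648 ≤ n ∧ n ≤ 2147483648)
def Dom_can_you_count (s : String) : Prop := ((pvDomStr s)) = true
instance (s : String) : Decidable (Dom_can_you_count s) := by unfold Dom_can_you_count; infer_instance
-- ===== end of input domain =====

-- B replaces A's running seen-vowel accumulator by a precomputed table of first-occurrence
-- indices of each vowel: the factor at an underscore position i is the number of
-- first occurrences strictly before i; objective: alternative.

-- ===== PORT A =====
-- step of A's 'for c in s' loop; state = (t, total)
def pvStepA (st : List Char × Int) (c : Char) : List Char × Int :=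
  if c ∈ ['a', 'e', 'i', 'o', 'u'] then
    (if c ∈ st.1 then st else (st.1 ++ [c], st.2))
  else if c = '_' then (st.1, st.2 * (st.1.length : Int))
  else st

def can_you_count (s : String) : Int :=
  PySem.Int.mod (s.toList.foldl pvStepA ([], 1)).2 9223372036854775808

-- ===== PORT B =====
-- firsts = [s.index(v) for v in "aeiou" if v in s]
def pvFirsts (cs : List Char) : List Nat :=
  ['a', 'e', 'i', 'o', 'u'].filterMap
    (fun v => if v ∈ cs then PySem.List.index? cs v else none)

-- sum(1 for f in firsts if f < i)
def pvFactor (firsts : List Nat) (i : Int) : Int :=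
  firsts.foldl (fun acc (f : Nat) => if (f : Int) < i then acc + 1 else acc) 0

def can_you_count_alt (s : String) : Int :=
  let cs := s.toList
  let firsts := pvFirsts cs
  let total := (PySem.List.enumerate cs).foldl
    (fun total ic => if ic.2 = '_' then total * pvFactor firsts ic.1 else total) 1
  PySem.Int.mod total 9223372036854775808

-- ===== PRECONDITION & SPEC =====
def Spec_can_you_count (s : String) (out : Int) : Prop := out = can_you_count_alt s
instance (s : String) (out : Int) : Decidable (Spec_can_you_count s out) := by unfold Spec_can_you_count; infer_instance

-- ===== CLAIM (what is proved, stated in full; the proofs are below) =====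
def Claim_equal_can_you_count : Prop := ∀ (s : String), Dom_can_you_count s → Spec_can_you_count s (can_you_count s)

-- ===== LEMMAS AND PROOFS =====

-- the step of B's fold, with the firsts table abstracted out
def pvStepB (fs : List Nat) (total : Int) (ic : Int × Char) : Int :=
  if ic.2 = '_' then total * pvFactor fs ic.1 else total

-- pvFactor is a countP
lemma pvFactor_eq_countP (fs : List Nat) (i : Int) :
    pvFactor fs i = ((fs.countP (fun f : Nat => decide ((f : Int) < i))) : Int) := by
  unfold pvFactor
  rw [PySem.List.foldl_ite_add_one]
  simp

-- every recorded first-occurrence index is in range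
lemma pvFirsts_lt (cs : List Char) : ∀ f ∈ pvFirsts cs, f < cs.length := by
  intro f hf
  unfold pvFirsts at hf
  obtain ⟨v, _, hv⟩ := List.mem_filterMap.mp hf
  by_cases hm : v ∈ cs
  · simp only [hm, if_pos] at hv
    obtain ⟨h, _, _⟩ := PySem.List.getElem_of_index?_eq_some hv
    exact h
  · simp [hm] at hv

-- the factor at the end-of-string position counts every first occurrence
lemma pvFactor_len (cs : List Char) :
    pvFactor (pvFirsts cs) (cs.length : Int) = ((pvFirsts cs).length : Int) := by
  rw [pvFactor_eq_countP]
  congr 1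
  rw [List.countP_eq_length]
  intro f hf
  have := pvFirsts_lt cs f hf
  simp; omega

-- |pvFirsts cs| counts the distinct vowels occurring in cs
lemma pvFirsts_length (cs : List Char) (vs : List Char) :
    (vs.filterMap (fun v => if v ∈ cs then PySem.List.index? cs v else none)).length
      = (vs.filter (fun v => decide (v ∈ cs))).length := by
  induction vs with
  | nil => rfl
  | cons v vs ih =>
    simp only [PySem.List.index?_eq_idxOf?] at ih ⊢
    by_cases hm : v ∈ cs
    · have hs : (PySem.List.index? cs v).isSome :=
        (PySem.List.index?_isSome_iff cs v).mpr hm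
      obtain ⟨k, hk⟩ := Option.isSome_iff_exists.mp hs
      rw [PySem.List.index?_eq_idxOf?] at hk
      simp [List.filterMap_cons, List.filter_cons, hm, hk, ih]
    · simp [List.filterMap_cons, List.filter_cons, hm, ih]

-- appending one character does not change the factor at any position ≤ |cs|
lemma pvFirsts_snoc_countP (vs cs : List Char) (c : Char) (i : Int) (hi : i ≤ (cs.length : Int)) :
    (vs.filterMap (fun v => if v ∈ cs ++ [c] then PySem.List.index? (cs ++ [c]) v else none)).countP
        (fun f : Nat => decide ((f : Int) < i))
      = (vs.filterMap (fun v => if v ∈ cs then PySem.List.index? cs v else none)).countP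
        (fun f : Nat => decide ((f : Int) < i)) := by
  induction vs with
  | nil => rfl
  | cons v vs ih =>
    simp only [PySem.List.index?_eq_idxOf?, List.mem_append, List.mem_singleton] at ih ⊢
    by_cases hm : v ∈ cs
    · have hm' : v ∈ cs ++ [c] := List.mem_append_left _ hm
      have hidx := PySem.List.index?_append_of_mem (l := cs) (t := [c]) (v := v) hm
      rw [PySem.List.index?_eq_idxOf?, PySem.List.index?_eq_idxOf?] at hidx
      cases hk : List.idxOf? v cs with
      | none =>
        simp [List.filterMap_cons, hm, hm', hidx, hk, ih]
      | some k =>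
        simp [List.filterMap_cons, hm, hm', hidx, hk, List.countP_cons, ih]
    · by_cases hc : v = c
      · subst hc
        have hm' : v ∈ cs ++ [v] := List.mem_append_right _ (List.mem_singleton.mpr rfl)
        have hidx : PySem.List.index? (cs ++ [v]) v = some cs.length :=
          PySem.List.index?_append_singleton_self cs v hm
        rw [PySem.List.index?_eq_idxOf?] at hidx
        have hmn : v ∉ cs := hm
        have hkn : List.idxOf? v cs = none := by
          rw [← PySem.List.index?_eq_idxOf?]
          exact (PySem.List.index?_eq_none_iff cs v).mpr hm
        have hlt : ¬ ((cs.length : Int) < i) := by omega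
        simp [List.filterMap_cons, hm, hm', hidx, hkn, List.countP_cons, hlt, ih]
      · have hm' : v ∉ cs ++ [c] := by
          simp [List.mem_append, hm, hc]
        simp [List.filterMap_cons, hm, hm', ih]

-- if c brings no NEW first occurrence of a listed vowel, the table is unchanged
lemma pvFirsts_snoc_eq (vs cs : List Char) (c : Char) (h : ∀ v ∈ vs, v = c → v ∈ cs) :
    vs.filterMap (fun v => if v ∈ cs ++ [c] then PySem.List.index? (cs ++ [c]) v else none)
      = vs.filterMap (fun v => if v ∈ cs then PySem.List.index? cs v else none) := by
  induction vs with
  | nil => rfl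
  | cons v vs ih =>
    have ih' := ih (fun w hw => h w (List.mem_cons_of_mem _ hw))
    simp only [PySem.List.index?_eq_idxOf?, List.mem_append, List.mem_singleton] at ih' ⊢
    by_cases hm : v ∈ cs
    · have hm' : v ∈ cs ++ [c] := List.mem_append_left _ hm
      have hidx := PySem.List.index?_append_of_mem (l := cs) (t := [c]) (v := v) hm
      rw [PySem.List.index?_eq_idxOf?, PySem.List.index?_eq_idxOf?] at hidx
      simp [List.filterMap_cons, hm, hm', hidx, ih']
    · have hc : v ≠ c := fun he => hm (h v List.mem_cons_self he)
      have hm' : v ∉ cs ++ [c] := by simp [List.mem_append, hm, hc]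
      simp [List.filterMap_cons, hm, hc, ih']

-- B's fold only looks at factors at positions occurring in the list
lemma foldB_congr (l : List (Int × Char)) (fs fs' : List Nat)
    (h : ∀ p ∈ l, pvFactor fs p.1 = pvFactor fs' p.1) (a : Int) :
    l.foldl (pvStepB fs) a = l.foldl (pvStepB fs') a := by
  induction l generalizing a with
  | nil => rfl
  | cons p l ih =>
    have hp := h p List.mem_cons_self
    have hl := fun q hq => h q (List.mem_cons_of_mem _ hq)
    simp only [List.foldl_cons, pvStepB, hp]
    exact ih hl _

-- positions produced by enumerate are below the length
lemma enumerate_fst_lt (cs : List Char) (p : Int × Char)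
    (hp : p ∈ PySem.List.enumerate cs) : 0 ≤ p.1 ∧ p.1 < (cs.length : Int) := by
  obtain ⟨k, hk, rfl⟩ := (PySem.List.mem_enumerate_iff _ _ _).mp hp
  simp
  omega

-- the main invariant, by induction on the string read from the right
lemma pv_main (cs : List Char) :
    (cs.foldl pvStepA ([], 1)).1.Nodup ∧
    (∀ x, x ∈ (cs.foldl pvStepA ([], 1)).1 ↔ x ∈ ['a','e','i','o','u'] ∧ x ∈ cs) ∧
    (cs.foldl pvStepA ([], 1)).2
      = (PySem.List.enumerate cs).foldl (pvStepB (pvFirsts cs)) 1 := by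
  induction cs using List.reverseRecOn with
  | nil => simp [PySem.List.enumerate]
  | append_singleton cs c ih =>
    obtain ⟨hnd, hmem, htot⟩ := ih
    have hA : (cs ++ [c]).foldl pvStepA ([], 1) = pvStepA (cs.foldl pvStepA ([], 1)) c :=
      List.foldl_append ..
    -- the inner fold over the old positions is unchanged by the new firsts table
    have hinner : (PySem.List.enumerate cs).foldl (pvStepB (pvFirsts (cs ++ [c]))) 1
        = (PySem.List.enumerate cs).foldl (pvStepB (pvFirsts cs)) 1 := by
      apply foldB_congr
      intro p hp
      have hb := enumerate_fst_lt cs p hp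
      rw [pvFactor_eq_countP, pvFactor_eq_countP]
      have := pvFirsts_snoc_countP ['a','e','i','o','u'] cs c p.1 (by omega)
      unfold pvFirsts
      exact_mod_cast this
    have hB : (PySem.List.enumerate (cs ++ [c])).foldl (pvStepB (pvFirsts (cs ++ [c]))) 1
        = pvStepB (pvFirsts (cs ++ [c]))
            ((PySem.List.enumerate cs).foldl (pvStepB (pvFirsts cs)) 1)
            ((cs.length : Int), c) := by
      rw [PySem.List.enumerate_append, List.foldl_append, hinner]
      simp [PySem.List.enumerate_cons, PySem.List.enumerate_nil]
    cases hst : cs.foldl pvStepA ([], 1) with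
    | mk t a =>
    rw [hst] at hnd hmem htot hA
    simp only at hnd hmem htot
    -- length of the accumulator = length of the firsts table
    have hlen : (t.length : Int) = ((pvFirsts cs).length : Int) := by
      have hperm : t.Perm (['a','e','i','o','u'].filter (fun v => decide (v ∈ cs))) := by
        rw [List.perm_ext_iff_of_nodup hnd (List.Nodup.filter _ (by decide))]
        intro x
        rw [hmem x, List.mem_filter]
        simp
      unfold pvFirsts
      rw [pvFirsts_length, ← hperm.length_eq]
    rw [hA]
    by_cases hv : c ∈ ['a','e','i','o','u']
    · have hcu : c ≠ '_' := fun h => absurd (h ▸ hv) (by decide)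
      have hBtot : (PySem.List.enumerate (cs ++ [c])).foldl (pvStepB (pvFirsts (cs ++ [c]))) 1
          = (PySem.List.enumerate cs).foldl (pvStepB (pvFirsts cs)) 1 := by
        rw [hB]; simp [pvStepB, hcu]
      by_cases hin : c ∈ t
      · have hcs : c ∈ cs := ((hmem c).mp hin).2
        have hstep : pvStepA (t, a) c = (t, a) := by simp [pvStepA, hv, hin]
        rw [hstep]
        refine ⟨hnd, ?_, ?_⟩
        · intro x
          show x ∈ t ↔ _
          rw [hmem x]
          constructor
          · rintro ⟨h1, h2⟩; exact ⟨h1, List.mem_append_left _ h2⟩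
          · rintro ⟨h1, h2⟩
            rcases List.mem_append.mp h2 with h2 | h2
            · exact ⟨h1, h2⟩
            · have : x = c := List.mem_singleton.mp h2
              subst this; exact ⟨h1, hcs⟩
        · show a = _
          rw [hBtot]; exact htot
      · have hcs : c ∉ cs := fun h => hin ((hmem c).mpr ⟨hv, h⟩)
        have hstep : pvStepA (t, a) c = (t ++ [c], a) := by simp [pvStepA, hv, hin]
        rw [hstep]
        refine ⟨?_, ?_, ?_⟩
        · show (t ++ [c]).Nodup
          rw [List.nodup_append]
          refine ⟨hnd, List.nodup_singleton c, ?_⟩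
          intro x hx b hb
          rw [List.mem_singleton] at hb
          subst hb
          exact fun he => hin (he ▸ hx)
        · intro x
          show x ∈ t ++ [c] ↔ _
          constructor
          · intro hx
            rcases List.mem_append.mp hx with hx | hx
            · obtain ⟨h1, h2⟩ := (hmem x).mp hx
              exact ⟨h1, List.mem_append_left _ h2⟩
            · have : x = c := List.mem_singleton.mp hx
              subst this
              exact ⟨hv, List.mem_append_right _ (List.mem_singleton.mpr rfl)⟩
          · rintro ⟨h1, h2⟩
            rcases List.mem_append.mp h2 with h2 | h2
            · exact List.mem_append_left _ ((hmem x).mpr ⟨h1, h2⟩)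
            · have : x = c := List.mem_singleton.mp h2
              subst this
              exact List.mem_append_right _ (List.mem_singleton.mpr rfl)
        · show a = _
          rw [hBtot]; exact htot
    · have heq : pvFirsts (cs ++ [c]) = pvFirsts cs := by
        unfold pvFirsts
        apply pvFirsts_snoc_eq
        intro v hvv hvc
        exact absurd (hvc ▸ hvv) hv
      by_cases hu : c = '_'
      · subst hu
        have hstep : pvStepA (t, a) '_' = (t, a * (t.length : Int)) := by
          simp [pvStepA, hv]
        rw [hstep]
        refine ⟨hnd, ?_, ?_⟩
        · intro x
          show x ∈ t ↔ _
          rw [hmem x]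
          constructor
          · rintro ⟨h1, h2⟩; exact ⟨h1, List.mem_append_left _ h2⟩
          · rintro ⟨h1, h2⟩
            rcases List.mem_append.mp h2 with h2 | h2
            · exact ⟨h1, h2⟩
            · have : x = '_' := List.mem_singleton.mp h2
              subst this; exact absurd h1 (by decide)
        · show a * (t.length : Int) = _
          rw [hB, heq, htot, hlen]
          simp [pvStepB, pvFactor_len]
      · have hstep : pvStepA (t, a) c = (t, a) := by simp [pvStepA, hv, hu]
        rw [hstep]
        refine ⟨hnd, ?_, ?_⟩
        · intro x
          show x ∈ t ↔ _
          rw [hmem x]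
          constructor
          · rintro ⟨h1, h2⟩; exact ⟨h1, List.mem_append_left _ h2⟩
          · rintro ⟨h1, h2⟩
            rcases List.mem_append.mp h2 with h2 | h2
            · exact ⟨h1, h2⟩
            · have : x = c := List.mem_singleton.mp h2
              subst this; exact absurd h1 hv
        · show a = _
          rw [hB, heq, htot]
          simp [pvStepB, hu]

-- ===== VERDICT (by name: the statement is the Claim_ definition above) =====
theorem can_you_count_spec : Claim_equal_can_you_count := by
  intro s _
  unfold Spec_can_you_count can_you_count can_you_count_alt
  have h := (pv_main s.toList).2.2
  simp only
  rw [h]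
  rfl
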